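-- pv_equiv track=rewrite | github.com/Nolanogenn/aoc | 2024/day7/solve.py | generate_sol
-- ===== SOURCE A (Python) =====
-- def generate_sol(eq):
--     ret = [eq[0]]
--     for y in eq[1:]:
--         toext = []
--         torem=0
--         for x in ret:
--             torem+=1
--             v1 = x * y
--             v2 = x + y
--             toext.append(v1)
--             toext.append(v2)
--         for _ in range(torem):
--             ret.pop(0)
--         ret += toext
--     return ret
-- ===== SOURCE B (Python) =====
-- def generate_sol(eq):
--     # Recurse on the prefix: results for eq[:-1], each extended with the last number.
--     if len(eq) == 1:
--         return [eq[0]]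
--     y = eq[-1]
--     return [v for x in generate_sol(eq[:-1]) for v in (x * y, x + y)]
-- ===== Notes on version B (the rewrite author's own statement) =====
-- stated objective: alternative
-- what changed: Replaces the in-place rebuild (append results to toext, pop(0) the old front one by one, then extend) with a recursion on eq[:-1] producing each level as one flat comprehension; the quadratic front-popping pass disappears.
import Mathlib
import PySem

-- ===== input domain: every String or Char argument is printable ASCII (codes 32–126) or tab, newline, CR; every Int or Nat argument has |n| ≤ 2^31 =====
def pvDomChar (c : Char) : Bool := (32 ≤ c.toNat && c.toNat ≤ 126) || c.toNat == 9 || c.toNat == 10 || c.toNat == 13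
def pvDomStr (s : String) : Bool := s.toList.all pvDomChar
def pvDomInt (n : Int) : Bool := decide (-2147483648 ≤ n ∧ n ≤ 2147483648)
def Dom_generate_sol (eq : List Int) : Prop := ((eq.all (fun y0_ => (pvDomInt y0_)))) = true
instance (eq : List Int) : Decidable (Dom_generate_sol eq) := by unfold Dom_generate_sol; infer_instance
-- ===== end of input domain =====

-- B replaces A's append/pop(0)/extend in-place rebuild by a recursion on eq[:-1] with a
-- flat comprehension; equivalence of the RETURN value is proved on nonempty lists.

-- ===== PORT A =====
-- 'for _ in range(torem): ret.pop(0)' — torem front-pops in sequence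
def popFrontN : Nat → List Int → List Int
  | 0, l => l
  | n + 1, l => popFrontN n (l.drop 1)

def generate_sol (eq : List Int) : List Int :=
  match eq with
  | [] => []  -- Python: eq[0] raises IndexError; excluded by Pre_generate_sol
  | h :: _ =>
    (PySem.List.slice eq (some 1) none).foldl (fun ret y =>
      -- inner loop: build toext and count torem
      let te := ret.foldl (fun (s : List Int × Nat) x =>
        ((s.1 ++ [x * y]) ++ [x + y], s.2 + 1)) ([], 0)
      -- pop torem elements from the front, then ret += toext
      (popFrontN te.2 ret) ++ te.1) [h]

-- ===== PORT B =====
def generate_sol_alt (eq : List Int) : List Int :=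
  if _h1 : eq.length = 1 then
    [eq.headD 0]  -- eq[0] of a one-element list
  else
    match _h2 : eq.getLast? with
    | none => []  -- Python: eq[-1] raises IndexError on []; excluded by Pre_generate_sol
    | some y =>
      (generate_sol_alt eq.dropLast).flatMap (fun x => [x * y, x + y])
termination_by eq.length
decreasing_by
  have hne : eq ≠ [] := by intro hn; simp [hn] at _h2
  have := List.length_pos_iff.mpr hne
  simp [List.length_dropLast]
  omega

-- ===== PRECONDITION & SPEC =====
-- Both Pythons raise IndexError on the empty list; Pre_ excludes exactly that input.
def Pre_generate_sol (eq : List Int) : Prop := eq ≠ []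
instance (eq : List Int) : Decidable (Pre_generate_sol eq) := by unfold Pre_generate_sol; infer_instance
def pvWitness_generate_sol : List Int := ([3, -2, 5])

def Spec_generate_sol (eq : List Int) (out : List Int) : Prop := out = generate_sol_alt eq
instance (eq : List Int) (out : List Int) : Decidable (Spec_generate_sol eq out) := by unfold Spec_generate_sol; infer_instance

-- ===== CLAIM (what is proved, stated in full; the proofs are below) =====
def Claim_equal_generate_sol : Prop := ∀ (eq : List Int), Dom_generate_sol eq → Pre_generate_sol eq → Spec_generate_sol eq (generate_sol eq)

-- ===== LEMMAS AND PROOFS =====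

theorem popFrontN_eq_drop (n : Nat) : ∀ (l : List Int), popFrontN n l = l.drop n := by
  induction n with
  | zero => intro l; rfl
  | succ n ih => intro l; simp [popFrontN, ih]

theorem inner_foldl (y : Int) (ret : List Int) : ∀ (acc : List Int) (n : Nat),
    ret.foldl (fun (s : List Int × Nat) x => ((s.1 ++ [x * y]) ++ [x + y], s.2 + 1)) (acc, n)
      = (acc ++ ret.flatMap (fun x => [x * y, x + y]), n + ret.length) := by
  induction ret with
  | nil => intro acc n; simp
  | cons a t ih =>
    intro acc n
    simp only [List.foldl_cons]
    rw [ih]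
    simp
    omega

theorem stepA_eq (y : Int) (ret : List Int) :
    (let te := ret.foldl (fun (s : List Int × Nat) x =>
        ((s.1 ++ [x * y]) ++ [x + y], s.2 + 1)) ([], 0)
     (popFrontN te.2 ret) ++ te.1)
      = ret.flatMap (fun x => [x * y, x + y]) := by
  simp only [inner_foldl, popFrontN_eq_drop]
  simp

theorem A_eq_foldl (h : Int) (t : List Int) :
    generate_sol (h :: t) = t.foldl (fun r y => r.flatMap (fun x => [x * y, x + y])) [h] := by
  have hs : PySem.List.slice (h :: t) (some 1) none = t := by
    rw [PySem.List.slice_from_one]; rfl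
  simp only [generate_sol, hs]
  congr 1
  funext ret y
  exact stepA_eq y ret

theorem B_eq_foldl (t : List Int) : ∀ (h : Int),
    generate_sol_alt (h :: t) = t.foldl (fun r y => r.flatMap (fun x => [x * y, x + y])) [h] := by
  induction t using List.reverseRecOn with
  | nil =>
    intro h
    rw [generate_sol_alt.eq_def]
    simp
  | append_singleton t' y ih =>
    intro h
    rw [generate_sol_alt.eq_def]
    have hlast : (h :: (t' ++ [y])).getLast? = some y := by
      rw [← List.cons_append, List.getLast?_concat]
    have hdl : (h :: (t' ++ [y])).dropLast = h :: t' := by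
      rw [← List.cons_append, List.dropLast_concat]
    rw [dif_neg (by simp)]
    split
    · next heq => rw [heq] at hlast; exact absurd hlast (by simp)
    · next y1 heq =>
        rw [heq] at hlast
        injection hlast with hy
        subst hy
        rw [hdl, ih, List.foldl_append]
        simp

-- ===== VERDICT (by name: the statement is the Claim_ definition above) =====
theorem generate_sol_spec : Claim_equal_generate_sol := by
  intro eq _ hpre
  unfold Spec_generate_sol
  match eq with
  | [] => exact absurd rfl hpre
  | h :: t => rw [A_eq_foldl, B_eq_foldl]
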